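-- pv_equiv track=rewrite | github.com/Awesome94/Algo_Python | getbinary.py | solution
-- ===== SOURCE A (Python) =====
-- def solution(N):
--     bin_n = bin(N)
--     binary = bin_n[2:]
--     results = {}
--     counts = binary.count('1')
--     gap = 0
--     for x in binary:
--         while counts > 0:
--             if x == '1':
--                 results[counts] = gap
--                 counts -= 1
--                 gap=0
--             else:
--                 gap+=1
--             break
--     return max(list(results.values()))
-- ===== SOURCE B (Python) =====
-- def solution(N):
--     parts = bin(N)[2:].split('1')
--     return max(len(p) for p in parts[:-1])
-- ===== Notes on version B (the rewrite author's own statement) =====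
-- stated objective: simpler
-- what changed: B replaces A's char-by-char loop carrying a counts-keyed dict of gap lengths with a single split of the binary string on '1': the answer is the maximum length among all parts except the last (which holds the trailing zeros).
-- outside the precondition, e.g. on solution(0): A raises ValueError, B raises ValueError
import Mathlib
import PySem

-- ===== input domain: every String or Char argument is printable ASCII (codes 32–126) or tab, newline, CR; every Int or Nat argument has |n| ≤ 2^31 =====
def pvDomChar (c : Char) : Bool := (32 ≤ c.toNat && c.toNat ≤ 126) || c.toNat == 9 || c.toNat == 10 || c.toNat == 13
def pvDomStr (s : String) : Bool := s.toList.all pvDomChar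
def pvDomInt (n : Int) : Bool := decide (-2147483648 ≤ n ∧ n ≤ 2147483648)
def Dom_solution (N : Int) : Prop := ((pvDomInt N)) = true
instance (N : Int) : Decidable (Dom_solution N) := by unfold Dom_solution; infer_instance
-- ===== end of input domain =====

-- B splits the binary string on '1' and takes the max part length (dropping the trailing part),
-- instead of A's char loop over a counts-keyed dict of gaps; same values, simpler (no speed claim).

-- shared helper: Python's bin(N)[2:], as a list of chars (both Pythons compute this same string)
-- binary digits of a natural number, most significant first; [] for 0
def pvNatBits (n : Nat) : List Char :=
  if h : n = 0 then []
  else pvNatBits (n / 2) ++ [if n % 2 = 1 then '1' else '0']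
decreasing_by exact Nat.div_lt_self (Nat.pos_of_ne_zero h) (by norm_num)

-- bin(N)[2:]  (bin(-5) = '-0b101', so [2:] keeps the 'b' for negative N)
def pyBinTail (N : Int) : List Char :=
  if N < 0 then 'b' :: pvNatBits N.natAbs
  else if N = 0 then ['0']
  else pvNatBits N.natAbs

-- ===== PORT A =====
-- the body of A's 'for x in binary' loop ('while counts > 0: … break' is an 'if counts > 0')
def pvStepA (st : Int × Int × PySem.Dict Int Int) (x : Char) : Int × Int × PySem.Dict Int Int :=
  if st.1 > 0 then
    if x = '1' then (st.1 - 1, 0, st.2.2.insert st.1 st.2.1)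
    else (st.1, st.2.1 + 1, st.2.2)
  else st

def solution (N : Int) : Int :=
  let binary := pyBinTail N
  -- binary.count('1'): str.count of a single char = List.count
  let fin := binary.foldl pvStepA (((binary.count '1' : Nat) : Int), 0, PySem.Dict.empty)
  -- max(list(results.values())); Python raises ValueError on [], excluded by Pre_solution
  (PySem.List.max? fin.2.2.values (fun v => v)).getD 0

-- ===== PORT B =====
-- s.split('1') on a char list (Python keeps empty pieces; never returns [])
def pySplit1 : List Char → List (List Char)
  | [] => [[]]
  | x :: t =>
    if x = '1' then [] :: pySplit1 t
    else
      match pySplit1 t with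
      | [] => [[x]]          -- unreachable: pySplit1 never returns []
      | h :: r => (x :: h) :: r

def solution_alt (N : Int) : Int :=
  let parts := pySplit1 (pyBinTail N)
  -- max(len(p) for p in parts[:-1]); Python raises ValueError on empty, excluded by Pre_solution
  (PySem.List.max? (parts.dropLast.map (fun p => (p.length : Int))) (fun v => v)).getD 0

-- ===== PRECONDITION & SPEC =====
-- N = 0 is excluded: its binary string '0' has no '1', so both Pythons raise ValueError (max of an empty sequence).
def Pre_solution (N : Int) : Prop := N ≠ 0
instance (N : Int) : Decidable (Pre_solution N) := by unfold Pre_solution; infer_instance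
def pvWitness_solution : Int := 9

def Spec_solution (N : Int) (out : Int) : Prop := out = solution_alt N
instance (N : Int) (out : Int) : Decidable (Spec_solution N out) := by unfold Spec_solution; infer_instance

-- ===== CLAIM (what is proved, stated in full; the proofs are below) =====
def Claim_equal_solution : Prop := ∀ (N : Int), Dom_solution N → Pre_solution N → Spec_solution N (solution N)

-- ===== LEMMAS AND PROOFS =====

-- the sequence of gap lengths A records, directly by recursion on the string
def pvGaps : List Char → Int → List Int
  | [], _ => []
  | x :: t, g => if x = '1' then g :: pvGaps t 0 else pvGaps t (g + 1)

theorem pySplit1_ne_nil (s : List Char) : pySplit1 s ≠ [] := by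
  cases s with
  | nil => simp [pySplit1]
  | cons x t =>
    simp only [pySplit1]
    split_ifs
    · simp
    · cases h : pySplit1 t <;> simp

theorem pvGaps_of_no_one (s : List Char) (h : s.count '1' = 0) (g : Int) : pvGaps s g = [] := by
  induction s generalizing g with
  | nil => rfl
  | cons x t ih =>
    have hx : x ≠ '1' := by
      intro hx; subst hx; simp at h
    have ht : t.count '1' = 0 := by
      simp [hx] at h; omega
    simp [pvGaps, hx, ih ht]

-- the values recorded by A's loop are exactly pvGaps, as long as every key already
-- in the dict is larger than the remaining count (so every insert is at a fresh key)
theorem foldA_values (s : List Char) (g : Int) (d : PySem.Dict Int Int)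
    (hk : ∀ k ∈ d.keys, ((s.count '1' : Nat) : Int) < k) :
    (s.foldl pvStepA (((s.count '1' : Nat) : Int), g, d)).2.2.values
      = d.values ++ pvGaps s g := by
  induction s generalizing g d with
  | nil => simp [pvGaps]
  | cons x t ih =>
    by_cases hx : x = '1'
    · subst hx
      have hc : ('1' :: t).count '1' = t.count '1' + 1 := by simp
      have hpos : (0:Int) < ((('1' :: t).count '1' : Nat) : Int) := by
        rw [hc]; positivity
      have hfresh : d.contains ((('1' :: t).count '1' : Nat) : Int) = false := by
        by_contra hcon
        have : ((('1' :: t).count '1' : Nat) : Int) ∈ d.keys := by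
          rw [← PySem.Dict.contains_iff_mem_keys]
          cases h : d.contains ((('1' :: t).count '1' : Nat) : Int)
          · exact absurd h hcon
          · rfl
        exact absurd (hk _ this) (lt_irrefl _)
      have hstep : pvStepA (((('1' :: t).count '1' : Nat) : Int), g, d) '1'
          = (((t.count '1' : Nat) : Int), 0,
             d.insert ((('1' :: t).count '1' : Nat) : Int) g) := by
        have h1 : ((('1' :: t).count '1' : Nat) : Int) - 1 = ((t.count '1' : Nat) : Int) := by
          omega
        simp only [pvStepA, if_pos hpos, reduceIte]
        rw [h1]
      rw [List.foldl_cons, hstep,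
        ih 0 (d.insert ((('1' :: t).count '1' : Nat) : Int) g) ?_]
      · have hcast : ((('1' :: t).count '1' : Nat) : Int) = ((t.count '1' : Nat) : Int) + 1 := by
          omega
        have hfresh' : d.contains (((t.count '1' : Nat) : Int) + 1) = false := by
          rw [← hcast]; exact hfresh
        have hval : (d.insert ((('1' :: t).count '1' : Nat) : Int) g).values
            = d.values ++ [g] := by
          simp [PySem.Dict.values, PySem.Dict.items_insert, hfresh']
        rw [hval]
        simp [pvGaps]
      · intro k hkmem
        rcases (PySem.Dict.mem_keys_insert _ _ _ _).mp hkmem with h1 | h1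
        · subst h1; omega
        · have := hk k h1; omega
    · have hcc : (x :: t).count '1' = t.count '1' := by
        simp [hx]
      by_cases hz : t.count '1' = 0
      · have hnpos : ¬ ((((x :: t).count '1' : Nat) : Int) > 0) := by
          rw [hcc, hz]; simp
        have hstep : pvStepA ((((x :: t).count '1' : Nat) : Int), g, d) x
            = ((((x :: t).count '1' : Nat) : Int), g, d) := by
          simp only [pvStepA, if_neg hnpos]
        rw [List.foldl_cons, hstep, hcc]
        rw [ih g d (by rw [← hcc]; exact hk)]
        rw [pvGaps_of_no_one t hz g]
        simp [pvGaps, hx, pvGaps_of_no_one t hz]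
      · have hpos : ((((x :: t).count '1' : Nat) : Int) > 0) := by
          rw [hcc]; omega
        have hstep : pvStepA ((((x :: t).count '1' : Nat) : Int), g, d) x
            = ((((x :: t).count '1' : Nat) : Int), g + 1, d) := by
          simp only [pvStepA, if_pos hpos, if_neg hx]
        rw [List.foldl_cons, hstep, hcc]
        rw [ih (g + 1) d (by rw [← hcc]; exact hk)]
        simp [pvGaps, hx]

-- pvGaps is the list of part lengths of the split (dropping the last part),
-- with the pending gap g added onto the first part
theorem pvGaps_eq_split (s : List Char) (g : Int) :
    pvGaps s g
      = match (pySplit1 s).dropLast.map (fun p => (p.length : Int)) with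
        | [] => []
        | h :: t => (g + h) :: t := by
  induction s generalizing g with
  | nil => simp [pvGaps, pySplit1]
  | cons x t ih =>
    by_cases hx : x = '1'
    · subst hx
      have hne := pySplit1_ne_nil t
      obtain ⟨h0, r0, hr⟩ : ∃ h0 r0, pySplit1 t = h0 :: r0 := by
        cases h : pySplit1 t with
        | nil => exact absurd h hne
        | cons a b => exact ⟨a, b, rfl⟩
      simp only [pvGaps, pySplit1, hr, reduceIte]
      rw [List.dropLast_cons_of_ne_nil (by simp)]
      simp only [List.map_cons, List.length_nil, Nat.cast_zero]
      have := ih 0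
      rw [hr] at this
      rw [this]
      cases hdl : (h0 :: r0).dropLast.map (fun p => (p.length : Int)) with
      | nil => simp
      | cons a b => simp
    · obtain ⟨h0, r0, hr⟩ : ∃ h0 r0, pySplit1 t = h0 :: r0 := by
        cases h : pySplit1 t with
        | nil => exact absurd h (pySplit1_ne_nil t)
        | cons a b => exact ⟨a, b, rfl⟩
      simp only [pvGaps, pySplit1, if_neg hx, hr]
      have := ih (g + 1)
      rw [hr] at this
      cases r0 with
      | nil => simp at this ⊢; exact this
      | cons a b =>
        rw [List.dropLast_cons_of_ne_nil (by simp)] at this ⊢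
        simp only [List.map_cons, List.length_cons] at this ⊢
        rw [this]
        push_cast
        ring_nf

theorem values_eq_parts (s : List Char) :
    (s.foldl pvStepA (((s.count '1' : Nat) : Int), 0, PySem.Dict.empty)).2.2.values
      = (pySplit1 s).dropLast.map (fun p => (p.length : Int)) := by
  rw [foldA_values s 0 PySem.Dict.empty (by simp [PySem.Dict.keys_empty])]
  have hemp : (PySem.Dict.empty : PySem.Dict Int Int).values = [] := rfl
  rw [hemp, List.nil_append]
  have := pvGaps_eq_split s 0
  cases hdl : (pySplit1 s).dropLast.map (fun p => (p.length : Int)) with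
  | nil => rw [hdl] at this; rw [this]
  | cons a b =>
    rw [hdl] at this
    simp only [zero_add] at this
    exact this

-- ===== VERDICT (by name: the statement is the Claim_ definition above) =====
theorem solution_spec : Claim_equal_solution := by
  intro N _ _
  show (PySem.List.max?
      ((pyBinTail N).foldl pvStepA ((((pyBinTail N).count '1' : Nat) : Int), 0, PySem.Dict.empty)).2.2.values
      (fun v => v)).getD 0
    = (PySem.List.max?
      ((pySplit1 (pyBinTail N)).dropLast.map (fun p => (p.length : Int))) (fun v => v)).getD 0
  rw [values_eq_parts (pyBinTail N)]
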